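-- pv_equiv track=rewrite | github.com/odys-z/hello | acsl-pydev/usaco/chapter01/crypt1.py | crypt2
-- ===== SOURCE A (Python) =====
-- from typing import List
--
-- def checkDigits(nums, prod) -> bool:
--     if prod > 9999 or prod <= 0:
--         return False
--     while prod > 0:
--         unit, prod = prod % 10, prod // 10
--         if unit not in nums:
--             return False
--     return True
--
-- def threeProd(abcde, nums) -> bool:
--     '''
--         a b c
--           d e
--       -------
--         * * *
--       * * *
--       -------
--       * * * *
--     '''
--     a, b, c, d, e = abcde
--     abc = a * 100 + b * 10 + c
--     p1 = (abc) * e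
--     if p1 > 999 or not checkDigits(nums, p1):
--         return False
--
--     p2 = (abc) * d
--     if p2 > 999 or not checkDigits(nums, p2):
--         return False
--
--     p = p1 + p2 * 10
--     if p > 9999 or not checkDigits(nums, p):
--         return False;
--
--     return True
--
-- def crypt2(n: int, nums: List[int]) -> int:
--     ans = 0
--
--     '''
--     reading:
--     https://en.wikipedia.org/wiki/Steinhaus%E2%80%93Johnson%E2%80%93Trotter_algorithm
--     https://en.wikipedia.org/wiki/Fisher%E2%80%93Yates_shuffle
--     '''
--
--     # brutal
--
--     def products(digits, radx):
--         perm = [0] * 5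
--         c = 0
--         while True:
--             yield perm
--             perm[digits - 1] += 1
--             if perm[digits - 1] >= radx:
--                 perm[digits - 1] = 0
--                 c = 1
--
--             digit = 3
--             while c > 0 and digit >= 0: # c must be 1
--                 perm[digit] += 1
--                 if perm[digit] >= radx:
--                     perm[digit] = 0
--                     c = 1
--                 else: c = 0
--                 digit -= 1
--             if c > 0:
--                 break
--
--     for p in products(5, len(nums)):
--         abcde = [nums[p[0]], nums[p[1]], nums[p[2]], nums[p[3]], nums[p[4]]]
--         if threeProd(abcde, nums):
--             ans += 1
--
--     return ans
-- ===== SOURCE B (Python) =====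
-- def checkDigits(nums, prod) -> bool:
--     if prod > 9999 or prod <= 0:
--         return False
--     while prod > 0:
--         unit, prod = prod % 10, prod // 10
--         if unit not in nums:
--             return False
--     return True
--
--
-- def crypt2(n, nums):
--     # Nested loops over digit VALUES with the e-partial-product check hoisted
--     # out of the d-loop, instead of A's odometer index generator + flat
--     # per-tuple revalidation.
--     ans = 0
--     for a in nums:
--         for b in nums:
--             for c in nums:
--                 abc = a * 100 + b * 10 + c
--                 for e in nums:
--                     p1 = abc * e
--                     if p1 <= 999 and checkDigits(nums, p1):
--                         for d in nums:
--                             p2 = abc * d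
--                             if p2 <= 999 and checkDigits(nums, p2):
--                                 p = p1 + p2 * 10
--                                 if p <= 9999 and checkDigits(nums, p):
--                                     ans += 1
--     return ans
-- ===== Notes on version B (the rewrite author's own statement) =====
-- stated objective: faster
-- what changed: Replaces A's hand-rolled odometer generator over index tuples (with per-tuple list indexing and flat threeProd revalidation) by five nested loops directly over digit values, hoisting the e-partial-product check out of the d-loop so failing (a,b,c,e) prefixes skip the whole d scan.
import Mathlib
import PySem

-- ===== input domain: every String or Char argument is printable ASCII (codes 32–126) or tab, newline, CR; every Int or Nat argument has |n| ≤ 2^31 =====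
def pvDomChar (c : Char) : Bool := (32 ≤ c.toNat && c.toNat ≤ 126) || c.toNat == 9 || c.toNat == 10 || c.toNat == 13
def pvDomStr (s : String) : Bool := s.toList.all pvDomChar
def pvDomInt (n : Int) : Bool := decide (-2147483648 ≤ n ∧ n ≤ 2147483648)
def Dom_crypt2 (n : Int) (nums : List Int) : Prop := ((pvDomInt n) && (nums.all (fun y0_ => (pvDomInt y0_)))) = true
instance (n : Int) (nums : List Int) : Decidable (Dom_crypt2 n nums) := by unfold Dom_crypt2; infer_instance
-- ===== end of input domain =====

-- B replaces A's odometer index generator + flat per-tuple revalidation by nested loops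
-- over digit values with the e-partial-product check hoisted out of the d-loop (measured faster
-- by a constant factor); equivalence is about the return value only.

-- ===== PORT A =====
-- shared helper: the same Python `checkDigits` appears verbatim in Source A and Source B.
-- while prod > 0 loop; fuel = prod.toNat is enough since prod // 10 < prod for prod > 0.
def checkDigitsLoop (nums : List Int) : Nat → Int → Bool
  | 0, prod => !(prod > 0)
  | f + 1, prod =>
    if prod > 0 then
      let unit := PySem.Int.mod prod 10
      let prod' := PySem.Int.floordiv prod 10
      if nums.contains unit then checkDigitsLoop nums f prod' else false
    else true

def checkDigits (nums : List Int) (prod : Int) : Bool :=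
  if prod > 9999 || prod ≤ 0 then false
  else checkDigitsLoop nums prod.toNat prod

def threeProd (a b c d e : Int) (nums : List Int) : Bool :=
  let abc := a * 100 + b * 10 + c
  let p1 := abc * e
  if p1 > 999 || !checkDigits nums p1 then false
  else
    let p2 := abc * d
    if p2 > 999 || !checkDigits nums p2 then false
    else
      let p := p1 + p2 * 10
      if p > 9999 || !checkDigits nums p then false
      else true

-- A's generator-driven while-loop; state = the five odometer digits + ans; the inner
-- carry loop (digit = 3 .. 0) is unrolled since its bound is the literal 5.
-- fuel = len(nums)^5 is exactly the number of yields; a pyGet? miss is the IndexError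
-- (nums = [], excluded by Pre_).
def cryptLoop (nums : List Int) : Nat → Int → Int → Int → Int → Int → Int → Int
  | 0, _, _, _, _, _, ans => ans
  | f + 1, p0, p1, p2, p3, p4, ans =>
    let r : Int := nums.length
    match PySem.List.pyGet? nums p0, PySem.List.pyGet? nums p1, PySem.List.pyGet? nums p2,
          PySem.List.pyGet? nums p3, PySem.List.pyGet? nums p4 with
    | some a, some b, some c, some d, some e =>
      let ans := if threeProd a b c d e nums then ans + 1 else ans
      let p4 := p4 + 1
      if p4 ≥ r then
        let p3 := p3 + 1
        if p3 ≥ r then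
          let p2 := p2 + 1
          if p2 ≥ r then
            let p1 := p1 + 1
            if p1 ≥ r then
              let p0 := p0 + 1
              if p0 ≥ r then ans
              else cryptLoop nums f p0 0 0 0 0 ans
            else cryptLoop nums f p0 p1 0 0 0 ans
          else cryptLoop nums f p0 p1 p2 0 0 ans
        else cryptLoop nums f p0 p1 p2 p3 0 ans
      else cryptLoop nums f p0 p1 p2 p3 p4 ans
    | _, _, _, _, _ => ans

def crypt2 (n : Int) (nums : List Int) : Int :=
  cryptLoop nums (nums.length ^ 5) 0 0 0 0 0 0

-- ===== PORT B =====
def crypt2_alt (n : Int) (nums : List Int) : Int :=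
  nums.foldl (fun ans a =>
    nums.foldl (fun ans b =>
      nums.foldl (fun ans c =>
        let abc := a * 100 + b * 10 + c
        nums.foldl (fun ans e =>
          let p1 := abc * e
          if p1 ≤ 999 && checkDigits nums p1 then
            nums.foldl (fun ans d =>
              let p2 := abc * d
              if p2 ≤ 999 && checkDigits nums p2 then
                let p := p1 + p2 * 10
                if p ≤ 9999 && checkDigits nums p then ans + 1 else ans
              else ans) ans
          else ans) ans) ans) ans) 0

-- ===== PRECONDITION & SPEC =====
-- Pre_ excludes only nums = [], on which A raises IndexError (nums[p[0]] on the first yield).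
def Pre_crypt2 (n : Int) (nums : List Int) : Prop := nums ≠ []
instance (n : Int) (nums : List Int) : Decidable (Pre_crypt2 n nums) := by unfold Pre_crypt2; infer_instance
def pvWitness_crypt2 : Int × List Int := (1, [2, 3, 4, 6, 8])

def Spec_crypt2 (n : Int) (nums : List Int) (out : Int) : Prop := out = crypt2_alt n nums
instance (n : Int) (nums : List Int) (out : Int) : Decidable (Spec_crypt2 n nums out) := by unfold Spec_crypt2; infer_instance

-- ===== CLAIM (what is proved, stated in full; the proofs are below) =====
def Claim_equal_crypt2 : Prop := ∀ (n : Int) (nums : List Int), Dom_crypt2 n nums → Pre_crypt2 n nums → Spec_crypt2 n nums (crypt2 n nums)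

-- ===== LEMMAS AND PROOFS =====

-- the per-tuple indicator both sides count
def pvInd (nums : List Int) (a b c d e : Int) : Int :=
  if threeProd a b c d e nums then 1 else 0

-- base-r encoding of the odometer state
def pvEnc (r n0 n1 n2 n3 n4 : Nat) : Nat := (((n0 * r + n1) * r + n2) * r + n3) * r + n4

-- indicator read off an encoded tuple
def pvG (nums : List Int) (w : Nat) : Int :=
  let r := nums.length
  pvInd nums (nums.getD (w / r ^ 4 % r) 0) (nums.getD (w / r ^ 3 % r) 0)
    (nums.getD (w / r ^ 2 % r) 0) (nums.getD (w / r % r) 0) (nums.getD (w % r) 0)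

-- tail sum from v to r^5
def pvTail (nums : List Int) (v : Nat) : Int :=
  ∑ w ∈ Finset.Ico v (nums.length ^ 5), pvG nums w

theorem pvEnc_lt {r n0 n1 n2 n3 n4 : Nat} (h0 : n0 < r) (h1 : n1 < r) (h2 : n2 < r)
    (h3 : n3 < r) (h4 : n4 < r) : pvEnc r n0 n1 n2 n3 n4 < r ^ 5 := by
  have step : ∀ (a m b : Nat), a < m → b < r → a * r + b < m * r := fun a m b ha hb =>
    calc a * r + b < a * r + r := by omega
    _ = (a + 1) * r := by ring
    _ ≤ m * r := Nat.mul_le_mul_right r ha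
  have e2 := step _ (r * r) n2 (step n0 r n1 h0 h1) h2
  have e3 := step _ (r * r * r) n3 e2 h3
  have e4 := step _ (r * r * r * r) n4 e3 h4
  calc pvEnc r n0 n1 n2 n3 n4 < r * r * r * r * r := e4
  _ = r ^ 5 := by ring

theorem pvEnc_decode {r n0 n1 n2 n3 n4 : Nat} (hr : 0 < r) (h0 : n0 < r) (h1 : n1 < r)
    (h2 : n2 < r) (h3 : n3 < r) (h4 : n4 < r) :
    pvEnc r n0 n1 n2 n3 n4 % r = n4 ∧ pvEnc r n0 n1 n2 n3 n4 / r % r = n3 ∧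
    pvEnc r n0 n1 n2 n3 n4 / r ^ 2 % r = n2 ∧ pvEnc r n0 n1 n2 n3 n4 / r ^ 3 % r = n1 ∧
    pvEnc r n0 n1 n2 n3 n4 / r ^ 4 % r = n0 := by
  have key : ∀ (m b : Nat), b < r → (m * r + b) % r = b ∧ (m * r + b) / r = m := by
    intro m b hb
    constructor
    · rw [mul_comm, Nat.mul_add_mod]; exact Nat.mod_eq_of_lt hb
    · rw [mul_comm, Nat.mul_add_div hr, Nat.div_eq_of_lt hb]; omega
  unfold pvEnc
  have k4 := key (((n0 * r + n1) * r + n2) * r + n3) n4 h4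
  have k3 := key ((n0 * r + n1) * r + n2) n3 h3
  have k2 := key (n0 * r + n1) n2 h2
  have k1 := key n0 n1 h1
  have q2 : ((((n0 * r + n1) * r + n2) * r + n3) * r + n4) / r ^ 2 = (n0 * r + n1) * r + n2 := by
    rw [pow_two, ← Nat.div_div_eq_div_mul, k4.2, k3.2]
  have q3 : ((((n0 * r + n1) * r + n2) * r + n3) * r + n4) / r ^ 3 = n0 * r + n1 := by
    rw [pow_succ, ← Nat.div_div_eq_div_mul, q2, k2.2]
  have q4 : ((((n0 * r + n1) * r + n2) * r + n3) * r + n4) / r ^ 4 = n0 := by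
    rw [pow_succ, ← Nat.div_div_eq_div_mul, q3, k1.2]
  exact ⟨k4.1, by rw [k4.2]; exact k3.1, by rw [q2]; exact k2.1, by rw [q3]; exact k1.1,
    by rw [q4]; exact Nat.mod_eq_of_lt h0⟩

theorem pvG_enc (nums : List Int) {i0 i1 i2 i3 i4 : Nat} (h0 : i0 < nums.length)
    (h1 : i1 < nums.length) (h2 : i2 < nums.length) (h3 : i3 < nums.length)
    (h4 : i4 < nums.length) :
    pvG nums (pvEnc nums.length i0 i1 i2 i3 i4) =
      pvInd nums (nums.getD i0 0) (nums.getD i1 0) (nums.getD i2 0) (nums.getD i3 0)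
        (nums.getD i4 0) := by
  have hr : 0 < nums.length := by omega
  obtain ⟨m4, m3, m2, m1, m0⟩ := pvEnc_decode hr h0 h1 h2 h3 h4
  simp only [pvG, m4, m3, m2, m1, m0]

theorem pvEnc_succ4 (r n0 n1 n2 n3 n4 : Nat) :
    pvEnc r n0 n1 n2 n3 (n4 + 1) = pvEnc r n0 n1 n2 n3 n4 + 1 := by
  unfold pvEnc; ring

theorem pvEnc_c1 {r n0 n1 n2 n3 n4 : Nat} (c4 : n4 + 1 = r) :
    pvEnc r n0 n1 n2 (n3 + 1) 0 = pvEnc r n0 n1 n2 n3 n4 + 1 := by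
  subst c4; unfold pvEnc; ring

theorem pvEnc_c2 {r n0 n1 n2 n3 n4 : Nat} (c4 : n4 + 1 = r) (c3 : n3 + 1 = r) :
    pvEnc r n0 n1 (n2 + 1) 0 0 = pvEnc r n0 n1 n2 n3 n4 + 1 := by
  subst c4
  have h : n3 = n4 := by omega
  subst h; unfold pvEnc; ring

theorem pvEnc_c3 {r n0 n1 n2 n3 n4 : Nat} (c4 : n4 + 1 = r) (c3 : n3 + 1 = r)
    (c2 : n2 + 1 = r) : pvEnc r n0 (n1 + 1) 0 0 0 = pvEnc r n0 n1 n2 n3 n4 + 1 := by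
  subst c4
  have h3 : n3 = n4 := by omega
  have h2 : n2 = n4 := by omega
  subst h3; subst h2; unfold pvEnc; ring

theorem pvEnc_c4 {r n0 n1 n2 n3 n4 : Nat} (c4 : n4 + 1 = r) (c3 : n3 + 1 = r)
    (c2 : n2 + 1 = r) (c1 : n1 + 1 = r) :
    pvEnc r (n0 + 1) 0 0 0 0 = pvEnc r n0 n1 n2 n3 n4 + 1 := by
  subst c4
  have h3 : n3 = n4 := by omega
  have h2 : n2 = n4 := by omega
  have h1 : n1 = n4 := by omega
  subst h3; subst h2; subst h1; unfold pvEnc; ring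

theorem pvEnc_top {r n0 n1 n2 n3 n4 : Nat} (c4 : n4 + 1 = r) (c3 : n3 + 1 = r)
    (c2 : n2 + 1 = r) (c1 : n1 + 1 = r) (c0 : n0 + 1 = r) :
    pvEnc r n0 n1 n2 n3 n4 + 1 = r ^ 5 := by
  subst c4
  have h3 : n3 = n4 := by omega
  have h2 : n2 = n4 := by omega
  have h1 : n1 = n4 := by omega
  have h0 : n0 = n4 := by omega
  subst h3; subst h2; subst h1; subst h0; unfold pvEnc; ring

theorem pvCryptLoop_eq (nums : List Int) :
    ∀ (f : Nat) (n0 n1 n2 n3 n4 : Nat) (ans : Int), n0 < nums.length → n1 < nums.length →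
      n2 < nums.length → n3 < nums.length → n4 < nums.length →
      nums.length ^ 5 - pvEnc nums.length n0 n1 n2 n3 n4 ≤ f →
      cryptLoop nums f (n0 : Int) (n1 : Int) (n2 : Int) (n3 : Int) (n4 : Int) ans =
        ans + pvTail nums (pvEnc nums.length n0 n1 n2 n3 n4) := by
  intro f
  induction f with
  | zero =>
    intro n0 n1 n2 n3 n4 ans h0 h1 h2 h3 h4 hf
    exact absurd (pvEnc_lt h0 h1 h2 h3 h4) (by omega)
  | succ f ih =>
    intro n0 n1 n2 n3 n4 ans h0 h1 h2 h3 h4 hf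
    have hr : 0 < nums.length := by omega
    have g0 : PySem.List.pyGet? nums (n0 : Int) = some (nums.getD n0 0) := by
      simp [PySem.List.pyGet?_natCast, List.getElem?_eq_getElem h0]
    have g1 : PySem.List.pyGet? nums (n1 : Int) = some (nums.getD n1 0) := by
      simp [PySem.List.pyGet?_natCast, List.getElem?_eq_getElem h1]
    have g2 : PySem.List.pyGet? nums (n2 : Int) = some (nums.getD n2 0) := by
      simp [PySem.List.pyGet?_natCast, List.getElem?_eq_getElem h2]
    have g3 : PySem.List.pyGet? nums (n3 : Int) = some (nums.getD n3 0) := by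
      simp [PySem.List.pyGet?_natCast, List.getElem?_eq_getElem h3]
    have g4 : PySem.List.pyGet? nums (n4 : Int) = some (nums.getD n4 0) := by
      simp [PySem.List.pyGet?_natCast, List.getElem?_eq_getElem h4]
    have hv := pvEnc_lt h0 h1 h2 h3 h4
    have hpeel : pvTail nums (pvEnc nums.length n0 n1 n2 n3 n4) =
        pvG nums (pvEnc nums.length n0 n1 n2 n3 n4) +
          pvTail nums (pvEnc nums.length n0 n1 n2 n3 n4 + 1) := by
      unfold pvTail
      exact Finset.sum_eq_sum_Ico_succ_bot hv _
    have hind : (if threeProd (nums.getD n0 0) (nums.getD n1 0) (nums.getD n2 0)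
          (nums.getD n3 0) (nums.getD n4 0) nums then ans + 1 else ans) =
        ans + pvG nums (pvEnc nums.length n0 n1 n2 n3 n4) := by
      rw [pvG_enc nums h0 h1 h2 h3 h4]
      unfold pvInd
      split_ifs <;> simp
    simp only [cryptLoop, g0, g1, g2, g3, g4]
    rw [hind]
    by_cases c4 : n4 + 1 = nums.length
    · rw [if_pos (show ((n4 : Int) + 1 ≥ (nums.length : Int)) by omega)]
      by_cases c3 : n3 + 1 = nums.length
      · rw [if_pos (show ((n3 : Int) + 1 ≥ (nums.length : Int)) by omega)]
        by_cases c2 : n2 + 1 = nums.length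
        · rw [if_pos (show ((n2 : Int) + 1 ≥ (nums.length : Int)) by omega)]
          by_cases c1 : n1 + 1 = nums.length
          · rw [if_pos (show ((n1 : Int) + 1 ≥ (nums.length : Int)) by omega)]
            by_cases c0 : n0 + 1 = nums.length
            · rw [if_pos (show ((n0 : Int) + 1 ≥ (nums.length : Int)) by omega)]
              have hz : pvTail nums (pvEnc nums.length n0 n1 n2 n3 n4 + 1) = 0 := by
                unfold pvTail
                rw [pvEnc_top c4 c3 c2 c1 c0, Finset.Ico_self, Finset.sum_empty]
              rw [hpeel, hz]; ring
            · rw [if_neg (show ¬((n0 : Int) + 1 ≥ (nums.length : Int)) by omega)]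
              have e := pvEnc_c4 (n0 := n0) c4 c3 c2 c1
              have hrec := ih (n0 + 1) 0 0 0 0
                (ans + pvG nums (pvEnc nums.length n0 n1 n2 n3 n4))
                (by omega) hr hr hr hr (by rw [e]; omega)
              push_cast at hrec
              rw [hrec, e, hpeel]; ring
          · rw [if_neg (show ¬((n1 : Int) + 1 ≥ (nums.length : Int)) by omega)]
            have e := pvEnc_c3 (n0 := n0) (n1 := n1) c4 c3 c2
            have hrec := ih n0 (n1 + 1) 0 0 0
              (ans + pvG nums (pvEnc nums.length n0 n1 n2 n3 n4))
              h0 (by omega) hr hr hr (by rw [e]; omega)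
            push_cast at hrec
            rw [hrec, e, hpeel]; ring
        · rw [if_neg (show ¬((n2 : Int) + 1 ≥ (nums.length : Int)) by omega)]
          have e := pvEnc_c2 (n0 := n0) (n1 := n1) (n2 := n2) c4 c3
          have hrec := ih n0 n1 (n2 + 1) 0 0
            (ans + pvG nums (pvEnc nums.length n0 n1 n2 n3 n4))
            h0 h1 (by omega) hr hr (by rw [e]; omega)
          push_cast at hrec
          rw [hrec, e, hpeel]; ring
      · rw [if_neg (show ¬((n3 : Int) + 1 ≥ (nums.length : Int)) by omega)]
        have e := pvEnc_c1 (n0 := n0) (n1 := n1) (n2 := n2) (n3 := n3) c4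
        have hrec := ih n0 n1 n2 (n3 + 1) 0
          (ans + pvG nums (pvEnc nums.length n0 n1 n2 n3 n4))
          h0 h1 h2 (by omega) hr (by rw [e]; omega)
        push_cast at hrec
        rw [hrec, e, hpeel]; ring
    · rw [if_neg (show ¬((n4 : Int) + 1 ≥ (nums.length : Int)) by omega)]
      have e := pvEnc_succ4 nums.length n0 n1 n2 n3 n4
      have hrec := ih n0 n1 n2 n3 (n4 + 1)
        (ans + pvG nums (pvEnc nums.length n0 n1 n2 n3 n4))
        h0 h1 h2 h3 (by omega) (by rw [e]; omega)
      push_cast at hrec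
      rw [hrec, e, hpeel]; ring

theorem pvSum_range_getD (l : List Int) (h : Int → Int) :
    (l.map h).sum = ∑ i ∈ Finset.range l.length, h (l.getD i 0) := by
  induction l with
  | nil => simp
  | cons x xs ih =>
    simp only [List.map_cons, List.sum_cons, List.length_cons]
    rw [Finset.sum_range_succ', ih]
    simp [add_comm]


-- B-side: peel the five folds into range-sums
def pvT2 (nums : List Int) (p1 abc d : Int) : Int :=
  if (abc * d ≤ 999 && checkDigits nums (abc * d)) &&
     (p1 + abc * d * 10 ≤ 9999 && checkDigits nums (p1 + abc * d * 10)) then 1 else 0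

def pvT1 (nums : List Int) (abc e : Int) : Int :=
  if abc * e ≤ 999 && checkDigits nums (abc * e) then
    ∑ i3 ∈ Finset.range nums.length, pvT2 nums (abc * e) abc (nums.getD i3 0)
  else 0

theorem pvDLoop (nums : List Int) (p1 abc ans : Int) :
    nums.foldl (fun ans d =>
      let p2 := abc * d
      if p2 ≤ 999 && checkDigits nums p2 then
        let p := p1 + p2 * 10
        if p ≤ 9999 && checkDigits nums p then ans + 1 else ans
      else ans) ans
    = ans + ∑ i3 ∈ Finset.range nums.length, pvT2 nums p1 abc (nums.getD i3 0) := by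
  have hb : (fun (ans d : Int) =>
      let p2 := abc * d
      if p2 ≤ 999 && checkDigits nums p2 then
        let p := p1 + p2 * 10
        if p ≤ 9999 && checkDigits nums p then ans + 1 else ans
      else ans) = fun ans d => ans + pvT2 nums p1 abc d := by
    funext ans d
    simp only [pvT2]
    split_ifs <;> simp_all
  rw [hb, PySem.List.foldl_add, pvSum_range_getD]

theorem pvELoop (nums : List Int) (abc ans : Int) :
    nums.foldl (fun ans e =>
      let p1 := abc * e
      if p1 ≤ 999 && checkDigits nums p1 then
        nums.foldl (fun ans d =>
          let p2 := abc * d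
          if p2 ≤ 999 && checkDigits nums p2 then
            let p := p1 + p2 * 10
            if p ≤ 9999 && checkDigits nums p then ans + 1 else ans
          else ans) ans
      else ans) ans
    = ans + ∑ i4 ∈ Finset.range nums.length, pvT1 nums abc (nums.getD i4 0) := by
  have hb : (fun (ans e : Int) =>
      let p1 := abc * e
      if p1 ≤ 999 && checkDigits nums p1 then
        nums.foldl (fun ans d =>
          let p2 := abc * d
          if p2 ≤ 999 && checkDigits nums p2 then
            let p := p1 + p2 * 10
            if p ≤ 9999 && checkDigits nums p then ans + 1 else ans
          else ans) ans
      else ans) = fun ans e => ans + pvT1 nums abc e := by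
    funext ans e
    simp only [pvT1]
    by_cases h : (abc * e ≤ 999 && checkDigits nums (abc * e)) = true
    · simp only [h, if_true]
      exact pvDLoop nums (abc * e) abc ans
    · simp [h]
  rw [hb, PySem.List.foldl_add, pvSum_range_getD]

-- pointwise: B's hoisted indicator is A's threeProd indicator
theorem pvInd_eq (nums : List Int) (a b c d e : Int) :
    pvInd nums a b c d e =
      if (a * 100 + b * 10 + c) * e ≤ 999 && checkDigits nums ((a * 100 + b * 10 + c) * e) then
        pvT2 nums ((a * 100 + b * 10 + c) * e) (a * 100 + b * 10 + c) d
      else 0 := by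
  simp only [pvInd, threeProd, pvT2]
  split_ifs <;> simp_all <;> omega

theorem pvT1_eq (nums : List Int) (a b c e : Int) :
    pvT1 nums (a * 100 + b * 10 + c) e =
      ∑ i3 ∈ Finset.range nums.length, pvInd nums a b c (nums.getD i3 0) e := by
  unfold pvT1
  by_cases h : ((a * 100 + b * 10 + c) * e ≤ 999 &&
      checkDigits nums ((a * 100 + b * 10 + c) * e)) = true
  · simp only [h, if_true]
    refine Finset.sum_congr rfl fun i _ => ?_
    rw [pvInd_eq, if_pos h]
  · simp only [h, if_false]
    symm
    refine Finset.sum_eq_zero fun i _ => ?_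
    rw [pvInd_eq, if_neg h]

theorem pvAlt_eq (n : Int) (nums : List Int) :
    crypt2_alt n nums =
      ∑ i0 ∈ Finset.range nums.length, ∑ i1 ∈ Finset.range nums.length,
      ∑ i2 ∈ Finset.range nums.length, ∑ i3 ∈ Finset.range nums.length,
      ∑ i4 ∈ Finset.range nums.length,
        pvInd nums (nums.getD i0 0) (nums.getD i1 0) (nums.getD i2 0) (nums.getD i3 0) (nums.getD i4 0) := by
  unfold crypt2_alt
  have hc : ∀ (a b ans : Int),
      nums.foldl (fun ans c =>
        let abc := a * 100 + b * 10 + c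
        nums.foldl (fun ans e =>
          let p1 := abc * e
          if p1 ≤ 999 && checkDigits nums p1 then
            nums.foldl (fun ans d =>
              let p2 := abc * d
              if p2 ≤ 999 && checkDigits nums p2 then
                let p := p1 + p2 * 10
                if p ≤ 9999 && checkDigits nums p then ans + 1 else ans
              else ans) ans
          else ans) ans) ans
      = ans + ∑ i2 ∈ Finset.range nums.length, ∑ i4 ∈ Finset.range nums.length,
          pvT1 nums (a * 100 + b * 10 + (nums.getD i2 0)) (nums.getD i4 0) := by
    intro a b ans
    have hb : (fun (ans c : Int) =>
        let abc := a * 100 + b * 10 + c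
        nums.foldl (fun ans e =>
          let p1 := abc * e
          if p1 ≤ 999 && checkDigits nums p1 then
            nums.foldl (fun ans d =>
              let p2 := abc * d
              if p2 ≤ 999 && checkDigits nums p2 then
                let p := p1 + p2 * 10
                if p ≤ 9999 && checkDigits nums p then ans + 1 else ans
              else ans) ans
          else ans) ans) = fun ans c => ans + ∑ i4 ∈ Finset.range nums.length,
            pvT1 nums (a * 100 + b * 10 + c) (nums.getD i4 0) := by
      funext ans c
      exact pvELoop nums (a * 100 + b * 10 + c) ans
    rw [hb, PySem.List.foldl_add, pvSum_range_getD]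
  have hbl : ∀ (a ans : Int),
      nums.foldl (fun ans b =>
        nums.foldl (fun ans c =>
          let abc := a * 100 + b * 10 + c
          nums.foldl (fun ans e =>
            let p1 := abc * e
            if p1 ≤ 999 && checkDigits nums p1 then
              nums.foldl (fun ans d =>
                let p2 := abc * d
                if p2 ≤ 999 && checkDigits nums p2 then
                  let p := p1 + p2 * 10
                  if p ≤ 9999 && checkDigits nums p then ans + 1 else ans
                else ans) ans
            else ans) ans) ans) ans
      = ans + ∑ i1 ∈ Finset.range nums.length, ∑ i2 ∈ Finset.range nums.length,
          ∑ i4 ∈ Finset.range nums.length,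
          pvT1 nums (a * 100 + (nums.getD i1 0) * 10 + (nums.getD i2 0)) (nums.getD i4 0) := by
    intro a ans
    have hb : (fun (ans b : Int) =>
        nums.foldl (fun ans c =>
          let abc := a * 100 + b * 10 + c
          nums.foldl (fun ans e =>
            let p1 := abc * e
            if p1 ≤ 999 && checkDigits nums p1 then
              nums.foldl (fun ans d =>
                let p2 := abc * d
                if p2 ≤ 999 && checkDigits nums p2 then
                  let p := p1 + p2 * 10
                  if p ≤ 9999 && checkDigits nums p then ans + 1 else ans
                else ans) ans
            else ans) ans) ans) = fun ans b => ans + ∑ i2 ∈ Finset.range nums.length,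
              ∑ i4 ∈ Finset.range nums.length,
              pvT1 nums (a * 100 + b * 10 + (nums.getD i2 0)) (nums.getD i4 0) := by
      funext ans b
      exact hc a b ans
    rw [hb, PySem.List.foldl_add, pvSum_range_getD]
  have hal : (fun (ans a : Int) =>
      nums.foldl (fun ans b =>
        nums.foldl (fun ans c =>
          let abc := a * 100 + b * 10 + c
          nums.foldl (fun ans e =>
            let p1 := abc * e
            if p1 ≤ 999 && checkDigits nums p1 then
              nums.foldl (fun ans d =>
                let p2 := abc * d
                if p2 ≤ 999 && checkDigits nums p2 then
                  let p := p1 + p2 * 10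
                  if p ≤ 9999 && checkDigits nums p then ans + 1 else ans
                else ans) ans
            else ans) ans) ans) ans) = fun ans a => ans + ∑ i1 ∈ Finset.range nums.length,
              ∑ i2 ∈ Finset.range nums.length, ∑ i4 ∈ Finset.range nums.length,
              pvT1 nums (a * 100 + (nums.getD i1 0) * 10 + (nums.getD i2 0)) (nums.getD i4 0) := by
    funext ans a
    exact hbl a ans
  rw [hal, PySem.List.foldl_add, pvSum_range_getD, zero_add]
  refine Finset.sum_congr rfl fun i0 _ => Finset.sum_congr rfl fun i1 _ =>
    Finset.sum_congr rfl fun i2 _ => ?_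
  rw [Finset.sum_comm]
  refine Finset.sum_congr rfl fun i4 _ => ?_
  rw [pvT1_eq]

theorem pvSplit (r m : Nat) (f : Nat → Int) :
    ∑ w ∈ Finset.range (m * r), f w =
      ∑ i ∈ Finset.range m, ∑ j ∈ Finset.range r, f (i * r + j) := by
  induction m with
  | zero => simp
  | succ m ih =>
    rw [Nat.succ_mul, Finset.sum_range_add, ih, Finset.sum_range_succ]

theorem pvTail_zero (nums : List Int) :
    pvTail nums 0 =
      ∑ i0 ∈ Finset.range nums.length, ∑ i1 ∈ Finset.range nums.length,
      ∑ i2 ∈ Finset.range nums.length, ∑ i3 ∈ Finset.range nums.length,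
      ∑ i4 ∈ Finset.range nums.length,
        pvInd nums (nums.getD i0 0) (nums.getD i1 0) (nums.getD i2 0) (nums.getD i3 0) (nums.getD i4 0) := by
  unfold pvTail
  rw [← Finset.range_eq_Ico,
    show nums.length ^ 5 = nums.length ^ 4 * nums.length from by ring, pvSplit,
    show nums.length ^ 4 = nums.length ^ 3 * nums.length from by ring, pvSplit,
    show nums.length ^ 3 = nums.length ^ 2 * nums.length from by ring, pvSplit,
    show nums.length ^ 2 = nums.length * nums.length from by ring, pvSplit]
  refine Finset.sum_congr rfl fun i0 h0 => Finset.sum_congr rfl fun i1 h1 =>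
    Finset.sum_congr rfl fun i2 h2 => Finset.sum_congr rfl fun i3 h3 =>
    Finset.sum_congr rfl fun i4 h4 => ?_
  exact pvG_enc nums (Finset.mem_range.mp h0) (Finset.mem_range.mp h1)
    (Finset.mem_range.mp h2) (Finset.mem_range.mp h3) (Finset.mem_range.mp h4)

-- ===== VERDICT (by name: the statement is the Claim_ definition above) =====
theorem crypt2_spec : Claim_equal_crypt2 := by
  intro n nums _ hpre
  unfold Spec_crypt2
  have hr : 0 < nums.length := List.length_pos_iff.mpr hpre
  have h := pvCryptLoop_eq nums (nums.length ^ 5) 0 0 0 0 0 0 hr hr hr hr hr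
    (by simp [pvEnc])
  simp only [pvEnc, Nat.zero_mul, Nat.add_zero, Nat.cast_zero] at h
  rw [show crypt2 n nums = cryptLoop nums (nums.length ^ 5) 0 0 0 0 0 0 from rfl, h,
    pvTail_zero, pvAlt_eq]
  ring
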